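-- pv_equiv track=rewrite | github.com/Nghia03092004/nghia03092004.github.io | project_euler_unified/problem_968/solution.py | stern_brocot_bfs
-- ===== SOURCE A (Python) =====
-- from collections import deque
--
-- def stern_brocot_bfs(K):
--     """Return first K fractions (a, b) from BFS of Stern-Brocot tree."""
--     queue = deque([(1, 1)])
--     fractions = []
--     count = 0
--     while count < K:
--         a, b = queue.popleft()
--         fractions.append((a, b))
--         count += 1
--         queue.append((a, a + b))
--         queue.append((a + b, b))
--     return fractions
-- ===== SOURCE B (Python) =====
-- def stern_brocot_bfs(K):
--     """Return first K fractions (a, b) from BFS of Stern-Brocot tree."""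
--     if K <= 0:
--         return []
--     # BFS order of this tree is the Calkin-Wilf enumeration: node n is
--     # (fusc(n), fusc(n+1)) with Stern's diatomic sequence fusc.
--     fusc = [0, 1]
--     while len(fusc) < K + 2:
--         i = len(fusc)
--         if i % 2 == 0:
--             fusc.append(fusc[i // 2])
--         else:
--             fusc.append(fusc[i // 2] + fusc[i // 2 + 1])
--     return list(zip(fusc[1:], fusc[2:]))
-- ===== Notes on version B (the rewrite author's own statement) =====
-- stated objective: alternative
-- what changed: Replaces the BFS queue with a direct tabulation of Stern's diatomic sequence (fusc): BFS order of this tree is the Calkin-Wilf enumeration, so the answer is the zip of adjacent entries of the fusc array, with no queue at all.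
import Mathlib
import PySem

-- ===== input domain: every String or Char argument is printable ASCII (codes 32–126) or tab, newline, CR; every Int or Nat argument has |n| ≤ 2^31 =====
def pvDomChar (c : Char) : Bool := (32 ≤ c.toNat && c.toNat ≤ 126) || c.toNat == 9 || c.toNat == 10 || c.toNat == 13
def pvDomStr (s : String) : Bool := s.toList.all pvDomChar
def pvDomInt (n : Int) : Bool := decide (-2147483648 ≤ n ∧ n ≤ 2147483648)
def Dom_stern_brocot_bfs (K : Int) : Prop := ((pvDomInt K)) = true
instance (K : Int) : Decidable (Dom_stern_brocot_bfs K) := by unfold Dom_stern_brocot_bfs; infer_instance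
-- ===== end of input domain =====

-- B replaces the BFS queue by tabulating Stern's diatomic sequence (fusc) and zipping
-- adjacent entries (the Calkin-Wilf enumeration): same values, no queue (objective: alternative).

-- ===== PORT A =====
-- while count < K: pop front, record it, push its two children; fuel = number of iterations = max K 0
def bfsLoopA : Nat → List (Int × Int) → List (Int × Int) → List (Int × Int)
  | 0, _queue, fractions => fractions
  | n + 1, queue, fractions =>
    match queue with
    | [] => fractions   -- unreachable: the queue starts nonempty and grows each iteration
    | (a, b) :: rest => bfsLoopA n (rest ++ [(a, a + b), (a + b, b)]) (fractions ++ [(a, b)])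

def stern_brocot_bfs (K : Int) : List (Int × Int) := bfsLoopA K.toNat [(1, 1)] []

-- ===== PORT B =====
-- while len(fusc) < K + 2: append fusc[i//2] (i even) or fusc[i//2] + fusc[i//2+1] (i odd);
-- fuel = number of iterations = K (for K ≥ 1).  Indices i//2, i//2+1 are always in range.
def fuscBuild : Nat → List Int → List Int
  | 0, fusc => fusc
  | n + 1, fusc =>
    let i : Nat := fusc.length
    if i % 2 = 0 then fuscBuild n (fusc ++ [fusc.getD (i / 2) 0])
    else fuscBuild n (fusc ++ [fusc.getD (i / 2) 0 + fusc.getD (i / 2 + 1) 0])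

def stern_brocot_bfs_alt (K : Int) : List (Int × Int) :=
  if K ≤ 0 then []
  else
    let fusc := fuscBuild K.toNat [0, 1]
    (PySem.List.slice fusc (some 1) none).zip (PySem.List.slice fusc (some 2) none)

-- ===== PRECONDITION & SPEC =====
def Spec_stern_brocot_bfs (K : Int) (out : List (Int × Int)) : Prop := out = stern_brocot_bfs_alt K
instance (K : Int) (out : List (Int × Int)) : Decidable (Spec_stern_brocot_bfs K out) := by unfold Spec_stern_brocot_bfs; infer_instance

-- ===== CLAIM (what is proved, stated in full; the proofs are below) =====
def Claim_equal_stern_brocot_bfs : Prop := ∀ (K : Int), Dom_stern_brocot_bfs K → Spec_stern_brocot_bfs K (stern_brocot_bfs K)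

-- ===== LEMMAS AND PROOFS =====

-- Stern's diatomic sequence (proof-side characterisation of both programs)
def fusc : Nat → Int
  | 0 => 0
  | 1 => 1
  | n + 2 =>
    if h : (n + 2) % 2 = 0 then fusc ((n + 2) / 2)
    else fusc ((n + 2) / 2) + fusc ((n + 2) / 2 + 1)
  decreasing_by all_goals omega

def node (n : Nat) : Int × Int := (fusc n, fusc (n + 1))

lemma fusc_two_mul (s : Nat) : fusc (2 * s) = fusc s := by
  match s with
  | 0 => rfl
  | s + 1 =>
    rw [show 2 * (s + 1) = 2 * s + 2 from by ring, fusc]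
    simp only [show (2 * s + 2) % 2 = 0 from by omega, dif_pos]
    congr 1; omega

lemma fusc_two_mul_add_one (s : Nat) : fusc (2 * s + 1) = fusc s + fusc (s + 1) := by
  match s with
  | 0 => simp [fusc]
  | s + 1 =>
    rw [show 2 * (s + 1) + 1 = (2 * s + 1) + 2 from by ring, fusc]
    rw [dif_neg (by omega)]
    congr 2 <;> omega

lemma loopA_inv (n : Nat) : ∀ (s : Nat) (acc : List (Int × Int)), 1 ≤ s →
    bfsLoopA n ((List.range' s s).map node) acc = acc ++ (List.range' s n).map node := by
  induction n with
  | zero => intro s acc _; simp [bfsLoopA]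
  | succ n ih =>
    intro s acc hs
    obtain ⟨m, rfl⟩ : ∃ m, s = m + 1 := ⟨s - 1, by omega⟩
    rw [List.range'_succ, List.map_cons]
    show bfsLoopA (n + 1) (node (m+1) :: (List.range' (m+2) m).map node) acc = _
    rw [show node (m+1) = (fusc (m+1), fusc (m+2)) from rfl]
    rw [bfsLoopA]
    have hc1 : (fusc (m+1), fusc (m+1) + fusc (m+2)) = node (2*(m+1)) := by
      simp only [node, fusc_two_mul]
      rw [show 2*(m+1)+1 = 2*(m+1)+1 from rfl, fusc_two_mul_add_one (m+1)]
    have hc2 : (fusc (m+1) + fusc (m+2), fusc (m+2)) = node (2*(m+1)+1) := by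
      simp only [node]
      rw [fusc_two_mul_add_one (m+1), show 2*(m+1)+1+1 = 2*(m+2) from by ring, fusc_two_mul]
    rw [hc1, hc2]
    have hq : (List.range' (m+2) m).map node ++ [node (2*(m+1)), node (2*(m+1)+1)]
        = (List.range' (m+2) (m+2)).map node := by
      rw [show m + 2 = (m + 1) + 1 from rfl, List.range'_concat, List.range'_concat]
      simp only [List.map_append, List.map_cons, List.map_nil, List.append_assoc]
      congr 3 <;> [skip; congr 1] <;> omega
    rw [hq, ih (m+2) _ (by omega)]
    rw [List.range'_succ, List.map_cons, List.append_assoc]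
    rfl

lemma stern_brocot_bfs_eq (K : Int) :
    stern_brocot_bfs K = (List.range' 1 K.toNat).map node := by
  have h0 : [((1 : Int), (1 : Int))] = (List.range' 1 1).map node := by
    simp [List.range'_succ, node, fusc]
  rw [stern_brocot_bfs, h0, loopA_inv K.toNat 1 [] (by omega), List.nil_append]

lemma getD_map_range_fusc (m k : Nat) (hk : k < m) :
    ((List.range m).map fusc).getD k 0 = fusc k := by
  rw [List.getD_eq_getElem?_getD, List.getElem?_map, List.getElem?_range hk]
  rfl

lemma fuscBuild_inv (n : Nat) : ∀ (m : Nat), 2 ≤ m →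
    fuscBuild n ((List.range m).map fusc) = (List.range (m + n)).map fusc := by
  induction n with
  | zero => intro m _; rfl
  | succ n ih =>
    intro m hm
    rw [fuscBuild]
    have hlen : ((List.range m).map fusc).length = m := by simp
    have hstep : ∀ x : List Int,
        x = [fusc m] → (List.range m).map fusc ++ x = (List.range (m+1)).map fusc := by
      intro x hx; rw [hx, List.range_succ, List.map_append, List.map_singleton]
    by_cases hpar : m % 2 = 0
    · have h2 : 2 * (m / 2) = m := by omega
      rw [hlen] at *
      rw [if_pos hpar]
      rw [hstep _ (by
        rw [getD_map_range_fusc m (m/2) (by omega)]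
        have h := fusc_two_mul (m/2)
        rw [h2] at h
        rw [h])]
      rw [ih (m+1) (by omega), show m + 1 + n = m + (n + 1) from by omega]
    · have h2 : 2 * (m / 2) + 1 = m := by omega
      rw [hlen] at *
      rw [if_neg hpar]
      rw [hstep _ (by
        rw [getD_map_range_fusc m (m/2) (by omega), getD_map_range_fusc m (m/2+1) (by omega)]
        have h := fusc_two_mul_add_one (m/2)
        rw [h2] at h
        rw [h])]
      rw [ih (m+1) (by omega), show m + 1 + n = m + (n + 1) from by omega]

lemma zip_shift (k : Nat) : ∀ s : Nat,
    (((List.range' s (k+1)).map fusc).zip ((List.range' (s+1) k).map fusc))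
      = (List.range' s k).map node := by
  induction k with
  | zero => intro s; simp [List.range'_succ]
  | succ k ih =>
    intro s
    rw [show List.range' (s+1) (k+1) = (s+1) :: List.range' (s+2) k from List.range'_succ]
    rw [show List.range' s (k+1+1) = s :: List.range' (s+1) (k+1) from List.range'_succ]
    rw [show List.range' s (k+1) = s :: List.range' (s+1) k from List.range'_succ]
    simp only [List.map_cons, List.zip_cons_cons]
    rw [ih (s+1)]
    rfl

lemma range_two_map_fusc : [(0 : Int), 1] = (List.range 2).map fusc := by
  simp [List.range_succ, fusc]

lemma drop_range_eq (j n : Nat) : (List.range n).drop j = List.range' j (n - j) := by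
  rw [List.range_eq_range', List.drop_range']
  congr 1; omega

-- ===== VERDICT (by name: the statement is the Claim_ definition above) =====
theorem stern_brocot_bfs_spec : Claim_equal_stern_brocot_bfs := by
  intro K _
  show stern_brocot_bfs K = stern_brocot_bfs_alt K
  rw [stern_brocot_bfs_eq, stern_brocot_bfs_alt]
  by_cases hK : K ≤ 0
  · rw [if_pos hK]
    simp [Int.toNat_of_nonpos hK]
  · rw [if_neg hK]
    have hk1 : 1 ≤ K.toNat := by omega
    simp only [range_two_map_fusc, fuscBuild_inv K.toNat 2 (by omega)]
    rw [PySem.List.slice_from _ (by norm_num : (0:Int) ≤ 1),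
        PySem.List.slice_from _ (by norm_num : (0:Int) ≤ 2),
        show Int.toNat 1 = 1 from rfl, show Int.toNat 2 = 2 from rfl,
        ← List.map_drop, ← List.map_drop,
        drop_range_eq 1 (2 + K.toNat), drop_range_eq 2 (2 + K.toNat),
        show 2 + K.toNat - 1 = K.toNat + 1 from by omega,
        show 2 + K.toNat - 2 = K.toNat from by omega,
        zip_shift K.toNat 1]
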